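-- pv_equiv track=rewrite | github.com/Gustavo-Aquino/DtuAutumn2023 | ProcessMining/assignment3/assignment3.py | dependency_graph_inline
-- ===== SOURCE A (Python) =====
-- def dependency_graph_inline(log):
--     dependency_graph = {}  # Initialize an empty dictionary to store the dependency graph
--
--     # Iterate through cases in the log
--     for case_id, events in log.items():
--         # Iterate through events within each case
--         for i in range(len(events) - 1):
--             current_event = events[i]
--             next_event = events[i + 1]
--
--             # Extract the current and next activities
--             current_activity = current_event['activity']
--             next_activity = next_event['activity']
--
--             # Check if the current activity is in the dependency graph
--             if current_activity in dependency_graph: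
--                 # Check if the next activity is already a key in the sub-dictionary
--                 if next_activity in dependency_graph[current_activity]:
--                     # Increment the frequency of the relationship
--                     dependency_graph[current_activity][next_activity] += 1
--                 else:
--                     # Create a new entry for the next activity
--                     dependency_graph[current_activity][next_activity] = 1
--             else:
--                 # Create a new entry for the current activity and the next activity
--                 dependency_graph[current_activity] = {next_activity: 1}
--
--     return dependency_graph
-- ===== SOURCE B (Python) =====
-- def dependency_graph_inline(log):
--     # Flatten the whole log into one list of directly-follows activity pairs.
--     pairs = [(a['activity'], b['activity'])
--              for events in log.values()
--              for a, b in zip(events, events[1:])]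
--     # Closed-form table: distinct sources in first-occurrence order, per source the
--     # distinct pairs in first-occurrence order, each frequency by counting in the flat list
--     # (no incremental dict mutation at all).
--     srcs = list(dict.fromkeys(src for src, _ in pairs))
--     uniq = list(dict.fromkeys(pairs))
--     return {src: {dst: pairs.count((src, dst)) for s, dst in uniq if s == src}
--             for src in srcs}
-- ===== Notes on version B (the rewrite author's own statement) =====
-- stated objective: alternative
-- what changed: B never mutates a nested dict: it flattens the log into one list of adjacent activity pairs, then derives the result declaratively - deduplicated sources and pairs in first-occurrence order with each frequency obtained by counting the pair in the flat list - instead of A's incremental membership-test-and-increment updates.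
import Mathlib
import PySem

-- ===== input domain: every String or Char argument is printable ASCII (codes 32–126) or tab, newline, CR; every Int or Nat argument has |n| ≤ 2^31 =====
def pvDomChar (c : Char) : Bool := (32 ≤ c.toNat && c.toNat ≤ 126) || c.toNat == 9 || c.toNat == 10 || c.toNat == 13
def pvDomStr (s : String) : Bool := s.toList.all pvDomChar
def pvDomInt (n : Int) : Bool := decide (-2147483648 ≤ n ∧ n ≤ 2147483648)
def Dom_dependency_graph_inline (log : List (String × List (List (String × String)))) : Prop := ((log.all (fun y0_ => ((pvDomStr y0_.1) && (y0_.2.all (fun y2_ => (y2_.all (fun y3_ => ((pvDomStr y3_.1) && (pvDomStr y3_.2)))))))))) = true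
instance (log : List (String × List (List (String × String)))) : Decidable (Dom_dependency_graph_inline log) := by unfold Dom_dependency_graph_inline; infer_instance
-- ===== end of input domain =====

-- B flattens the log into one list of adjacent activity pairs and builds the result
-- declaratively (dedup in first-occurrence order + counting in the flat list) instead
-- of A's incremental nested-dict updates (alternative decomposition, no speed claim).


-- ===== PORT A =====
def dependency_graph_inline (log : List (String × List (List (String × String)))) : List (String × List (String × Int)) :=
  let dg : PySem.Dict String (PySem.Dict String Int) :=
    log.foldl (fun dg ce =>
      (PySem.List.pyRange 0 (PySem.List.len ce.2 - 1) 1).foldl (fun dg i =>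
        let current_event := PySem.List.pyGetD ce.2 i []
        let next_event := PySem.List.pyGetD ce.2 (i + 1) []
        let current_activity := ((PySem.Dict.mk current_event).get? "activity").getD ""
        let next_activity := ((PySem.Dict.mk next_event).get? "activity").getD ""
        if dg.contains current_activity then
          if (dg.getD current_activity PySem.Dict.empty).contains next_activity then
            dg.modify current_activity PySem.Dict.empty (fun inner => inner.modify next_activity 0 (· + 1))
          else
            dg.modify current_activity PySem.Dict.empty (fun inner => inner.insert next_activity 1)
        else
          dg.insert current_activity (PySem.Dict.empty.insert next_activity 1)) dg) PySem.Dict.empty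
  dg.items.map (fun p => (p.1, p.2.items))

-- ===== PORT B =====
-- Source B's comprehension over log.values() with zip(events, events[1:]) is the flatMap below
-- (events[1:] = drop 1); dict.fromkeys-dedup is PySem.Set.ofList; the nested dict
-- comprehensions are the two maps with pairs.count((src, dst)) as List.count.
def dependency_graph_inline_alt (log : List (String × List (List (String × String)))) : List (String × List (String × Int)) :=
  let pairs : List (String × String) :=
    log.flatMap (fun ce => (ce.2.zip (ce.2.drop 1)).map (fun ab =>
      (((PySem.Dict.mk ab.1).get? "activity").getD "",
       ((PySem.Dict.mk ab.2).get? "activity").getD "")))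
  let srcs : List String := PySem.Set.ofList (pairs.map (fun p => p.1))
  let uniq : List (String × String) := PySem.Set.ofList pairs
  srcs.map (fun src =>
    (src, (uniq.filter (fun p => p.1 == src)).map (fun p => (p.2, (pairs.count (src, p.2) : Int)))))

-- ===== PRECONDITION & SPEC =====
-- Pre_ excludes exactly the logs in which some event of a case with at least two events
-- lacks the key "activity": there Python A raises KeyError (and Python B does too).
def Pre_dependency_graph_inline (log : List (String × List (List (String × String)))) : Prop :=
  (log.all (fun ce => decide (ce.2.length ≤ 1) || ce.2.all (fun e => (PySem.Dict.mk e).contains "activity"))) = true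
instance (log : List (String × List (List (String × String)))) : Decidable (Pre_dependency_graph_inline log) := by unfold Pre_dependency_graph_inline; infer_instance

def pvWitness_dependency_graph_inline : (List (String × List (List (String × String)))) :=
  [("case1", [[("activity", "a")], [("activity", "b")], [("activity", "a")], [("activity", "b")]]),
   ("case2", [[("activity", "b")], [("activity", "a")]])]

def Spec_dependency_graph_inline (log : List (String × List (List (String × String)))) (out : List (String × List (String × Int))) : Prop := out = dependency_graph_inline_alt log
instance (log : List (String × List (List (String × String)))) (out : List (String × List (String × Int))) : Decidable (Spec_dependency_graph_inline log out) := by unfold Spec_dependency_graph_inline; infer_instance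

-- ===== CLAIM (what is proved, stated in full; the proofs are below) =====
def Claim_equal_dependency_graph_inline : Prop := ∀ (log : List (String × List (List (String × String)))), Dom_dependency_graph_inline log → Pre_dependency_graph_inline log → Spec_dependency_graph_inline log (dependency_graph_inline log)

-- ===== LEMMAS AND PROOFS =====

-- the activity of one event, as both ports compute it
def pvAct (e : List (String × String)) : String := ((PySem.Dict.mk e).get? "activity").getD ""

-- directly-follows activity pairs of one case
def pvPairs (es : List (List (String × String))) : List (String × String) :=
  (es.zip es.tail).map (fun ab => (pvAct ab.1, pvAct ab.2))

-- all pairs of the whole log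
def pvPs (log : List (String × List (List (String × String)))) : List (String × String) :=
  log.flatMap (fun ce => pvPairs ce.2)

-- A's per-pair update
def pvStepA (dg : PySem.Dict String (PySem.Dict String Int)) (p : String × String) :
    PySem.Dict String (PySem.Dict String Int) :=
  if dg.contains p.1 then
    if (dg.getD p.1 PySem.Dict.empty).contains p.2 then
      dg.modify p.1 PySem.Dict.empty (fun inner => inner.modify p.2 0 (· + 1))
    else
      dg.modify p.1 PySem.Dict.empty (fun inner => inner.insert p.2 1)
  else
    dg.insert p.1 (PySem.Dict.empty.insert p.2 1)

-- canonical form of the nested dict determined by the pair list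
def pvInner (ps : List (String × String)) (s : String) : List (String × Int) :=
  ((PySem.Set.ofList ps).filter (fun q => q.1 == s)).map (fun q => (q.2, (ps.count q : Int)))

def pvG (ps : List (String × String)) : PySem.Dict String (PySem.Dict String Int) :=
  PySem.Dict.mk ((PySem.Set.ofList (ps.map Prod.fst)).map (fun s => (s, PySem.Dict.mk (pvInner ps s))))

lemma pv_foldl_funext {α β : Type} (l : List α) (f g : β → α → β) (b : β)
    (h : ∀ x y, f x y = g x y) : l.foldl f b = l.foldl g b := by
  have hfg : f = g := funext fun x => funext fun y => h x y
  rw [hfg]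

lemma pv_count_append_ne (l : List (String × String)) (p q : String × String) (h : p ≠ q) :
    (l ++ [p]).count q = l.count q := by
  rw [List.count_append]
  have h0 : List.count q [p] = 0 := List.count_eq_zero.mpr (by simp [Ne.symm h])
  omega

lemma pv_count_append_self (l : List (String × String)) (p : String × String) :
    (l ++ [p]).count p = l.count p + 1 := by
  simp [List.count_append]

lemma pv_ofList_append {α : Type} [BEq α] (l : List α) (x : α) :
    PySem.Set.ofList (l ++ [x]) = PySem.Set.add (PySem.Set.ofList l) x := by
  simp [PySem.Set.ofList, List.foldl_append]

lemma pv_add_of_mem {α : Type} [BEq α] [LawfulBEq α] (s : PySem.Set α) (x : α) (h : x ∈ s) :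
    PySem.Set.add s x = s := by
  simp [PySem.Set.add]
  exact h

lemma pv_add_of_not_mem {α : Type} [BEq α] [LawfulBEq α] (s : PySem.Set α) (x : α) (h : ¬ x ∈ s) :
    PySem.Set.add s x = s ++ [x] := by
  simp [PySem.Set.add]
  intro hc
  exact absurd hc h

lemma pv_ofList_append_mem {α : Type} [BEq α] [LawfulBEq α] (l : List α) (x : α) (h : x ∈ l) :
    PySem.Set.ofList (l ++ [x]) = PySem.Set.ofList l := by
  rw [pv_ofList_append, pv_add_of_mem]
  rwa [PySem.Set.mem_ofList]

lemma pv_ofList_append_not_mem {α : Type} [BEq α] [LawfulBEq α] (l : List α) (x : α) (h : ¬ x ∈ l) :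
    PySem.Set.ofList (l ++ [x]) = PySem.Set.ofList l ++ [x] := by
  rw [pv_ofList_append, pv_add_of_not_mem]
  rwa [PySem.Set.mem_ofList]

-- generic facts about dicts of the shape mk ((ofList ks).map (fun s => (s, F s)))
lemma pv_mkmap_keys_nodup (ks : List String) (F : String → PySem.Dict String Int) :
    (PySem.Dict.mk ((PySem.Set.ofList ks).map (fun s => (s, F s)))).keys.Nodup := by
  rw [PySem.Dict.keys_mk, List.map_map]
  have hcomp : ((fun x : String × PySem.Dict String Int => x.1) ∘ fun s => (s, F s))
      = fun s : String => s := by funext s; rfl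
  rw [hcomp, List.map_id']
  exact PySem.Set.nodup_ofList ks

lemma pv_mkmap_contains_iff (ks : List String) (F : String → PySem.Dict String Int) (s : String) :
    (PySem.Dict.mk ((PySem.Set.ofList ks).map (fun x => (x, F x)))).contains s = true ↔ s ∈ ks := by
  simp [PySem.Dict.contains_mk, List.any_eq_true, PySem.Set.mem_ofList, beq_iff_eq]

lemma pv_mkmap_getD (ks : List String) (F : String → PySem.Dict String Int) (s : String)
    (h : s ∈ ks) :
    (PySem.Dict.mk ((PySem.Set.ofList ks).map (fun x => (x, F x)))).getD s PySem.Dict.empty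
      = F s := by
  apply PySem.Dict.getD_of_mem_items
  · exact List.mem_map_of_mem ((PySem.Set.mem_ofList ks s).mpr h)
  · exact pv_mkmap_keys_nodup ks F

-- membership of a value key in an inner dict of the canonical form
lemma pv_inner_contains_iff (L : List (String × String)) (w : (String × String) → Int)
    (p : String × String) :
    (PySem.Dict.mk ((L.filter (fun q => q.1 == p.1)).map (fun q => (q.2, w q)))).contains p.2 = true
      ↔ p ∈ L := by
  simp only [PySem.Dict.contains_mk, List.any_eq_true, List.mem_map, List.mem_filter,
    beq_iff_eq]
  constructor
  · rintro ⟨r, ⟨q, ⟨hqL, hq1⟩, rfl⟩, h2⟩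
    have hq2 : q.2 = p.2 := h2
    have : q = p := Prod.ext hq1 hq2
    rwa [this] at hqL
  · intro hp
    exact ⟨(p.2, w p), ⟨p, ⟨hp, rfl⟩, rfl⟩, rfl⟩

lemma pv_inner_mk_keys_nodup (L : List (String × String)) (w : (String × String) → Int)
    (s : String) (hL : L.Nodup) :
    (PySem.Dict.mk ((L.filter (fun q => q.1 == s)).map (fun q => (q.2, w q)))).keys.Nodup := by
  rw [PySem.Dict.keys_mk, List.map_map]
  have hf : (L.filter (fun q => q.1 == s)).Nodup := hL.filter _
  apply List.Nodup.map_on _ hf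
  intro q hq r hr hqr
  have hq1 : q.1 = s := by simpa [beq_iff_eq] using (List.mem_filter.mp hq).2
  have hr1 : r.1 = s := by simpa [beq_iff_eq] using (List.mem_filter.mp hr).2
  simp only [Function.comp] at hqr
  exact Prod.ext (hq1.trans hr1.symm) hqr

lemma pv_inner_getD (L : List (String × String)) (w : (String × String) → Int)
    (p : String × String) (hL : L.Nodup) (hp : p ∈ L) :
    (PySem.Dict.mk ((L.filter (fun q => q.1 == p.1)).map (fun q => (q.2, w q)))).getD p.2 0
      = w p := by
  apply PySem.Dict.getD_of_mem_items
  · exact List.mem_map_of_mem (List.mem_filter.mpr ⟨hp, by simp⟩)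
  · exact pv_inner_mk_keys_nodup L w p.1 hL

lemma pvInner_append_ne (ps : List (String × String)) (p : String × String) (s : String)
    (h : s ≠ p.1) : pvInner (ps ++ [p]) s = pvInner ps s := by
  unfold pvInner
  have hf : (PySem.Set.ofList (ps ++ [p])).filter (fun q => q.1 == s)
      = (PySem.Set.ofList ps).filter (fun q => q.1 == s) := by
    by_cases hp : p ∈ ps
    · rw [pv_ofList_append_mem _ _ hp]
    · rw [pv_ofList_append_not_mem _ _ hp, List.filter_append]
      have hb : (fun q : String × String => q.1 == s) p = false := by
        simp
        exact fun e => h e.symm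
      simp [hb]
  rw [hf]
  apply List.map_congr_left
  intro q hq
  have hq1 : q.1 = s := by simpa [beq_iff_eq] using (List.mem_filter.mp hq).2
  have hqp : p ≠ q := fun e => h (by rw [← hq1, ← e])
  rw [pv_count_append_ne _ _ _ hqp]

lemma pvInner_append_self (ps : List (String × String)) (p : String × String) :
    pvInner (ps ++ [p]) p.1
      = if p ∈ ps then
          (pvInner ps p.1).map (fun r => if r.1 == p.2 then (p.2, (ps.count p : Int) + 1) else r)
        else pvInner ps p.1 ++ [(p.2, (ps.count p : Int) + 1)] := by
  by_cases hp : p ∈ ps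
  · rw [if_pos hp]
    unfold pvInner
    rw [pv_ofList_append_mem _ _ hp, List.map_map]
    apply List.map_congr_left
    intro q hq
    have hq1 : q.1 = p.1 := by simpa [beq_iff_eq] using (List.mem_filter.mp hq).2
    by_cases hq2 : q.2 = p.2
    · have hqp : q = p := Prod.ext hq1 hq2
      subst hqp
      simp only [Function.comp, beq_self_eq_true, if_pos]
      rw [pv_count_append_self]
      push_cast
      ring_nf
    · have hqp : p ≠ q := fun e => hq2 (by rw [← e])
      have hb : (q.2 == p.2) = false := by simp [hq2]
      simp only [Function.comp, hb, Bool.false_eq_true, if_neg, not_false_iff]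
      rw [pv_count_append_ne _ _ _ hqp]
  · rw [if_neg hp]
    unfold pvInner
    rw [pv_ofList_append_not_mem _ _ hp, List.filter_append,
      List.map_append]
    congr 1
    · apply List.map_congr_left
      intro q hq
      have hqS : q ∈ ps := (PySem.Set.mem_ofList _ _).mp (List.mem_filter.mp hq).1
      have hqp : p ≠ q := fun e => hp (e ▸ hqS)
      rw [pv_count_append_ne _ _ _ hqp]
    · simp only [List.filter_singleton, beq_self_eq_true, cond_true, List.map_cons, List.map_nil]
      rw [pv_count_append_self]
      push_cast
      ring_nf

lemma pv_stepA_G (ps : List (String × String)) (p : String × String) :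
    pvStepA (pvG ps) p = pvG (ps ++ [p]) := by
  have hndS : (PySem.Set.ofList ps).Nodup := PySem.Set.nodup_ofList ps
  by_cases h1 : p.1 ∈ ps.map Prod.fst
  · have hc1 : (pvG ps).contains p.1 = true := (pv_mkmap_contains_iff _ _ _).mpr h1
    have hgetD : (pvG ps).getD p.1 PySem.Dict.empty = PySem.Dict.mk (pvInner ps p.1) :=
      pv_mkmap_getD _ _ _ h1
    by_cases h2 : p ∈ ps
    · have h2' : p ∈ PySem.Set.ofList ps := (PySem.Set.mem_ofList _ _).mpr h2
      have hc2 : (PySem.Dict.mk (pvInner ps p.1)).contains p.2 = true :=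
        (pv_inner_contains_iff _ _ _).mpr h2'
      have hget2 : (PySem.Dict.mk (pvInner ps p.1)).getD p.2 0 = (ps.count p : Int) :=
        pv_inner_getD (PySem.Set.ofList ps) (fun q => (ps.count q : Int)) p hndS h2'
      unfold pvStepA
      rw [hc1, if_pos rfl, hgetD, hc2, if_pos rfl]
      simp only [PySem.Dict.modify]
      rw [hgetD, hget2]
      apply PySem.Dict.ext
      rw [PySem.Dict.items_insert_of_contains _ _ hc1]
      show _ = (pvG (ps ++ [p])).items
      unfold pvG
      rw [List.map_append, List.map_singleton, pv_ofList_append_mem _ _ h1]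
      show (((PySem.Set.ofList (ps.map Prod.fst)).map
          (fun s => (s, PySem.Dict.mk (pvInner ps s)))).map _) = _
      rw [List.map_map]
      apply List.map_congr_left
      intro s _hs
      by_cases hsp : s = p.1
      · subst hsp
        simp only [Function.comp, beq_self_eq_true, if_pos]
        refine congrArg (fun d => (p.1, d)) ?_
        apply PySem.Dict.ext
        rw [PySem.Dict.items_insert_of_contains _ _ hc2]
        show _ = (PySem.Dict.mk (pvInner (ps ++ [p]) p.1)).items
        rw [pvInner_append_self, if_pos h2]
      · have hbeq : (s == p.1) = false := by simp [hsp]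
        simp only [Function.comp, hbeq, Bool.false_eq_true, if_neg, not_false_iff]
        rw [pvInner_append_ne _ _ _ hsp]
    · have h2' : ¬ p ∈ PySem.Set.ofList ps := by rwa [PySem.Set.mem_ofList]
      have hc2 : (PySem.Dict.mk (pvInner ps p.1)).contains p.2 = false := by
        rw [Bool.eq_false_iff]
        intro hcc
        exact h2' ((pv_inner_contains_iff _ _ _).mp hcc)
      unfold pvStepA
      rw [hc1, if_pos rfl, hgetD, hc2, if_neg (by simp)]
      simp only [PySem.Dict.modify]
      rw [hgetD]
      apply PySem.Dict.ext
      rw [PySem.Dict.items_insert_of_contains _ _ hc1]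
      show _ = (pvG (ps ++ [p])).items
      unfold pvG
      rw [List.map_append, List.map_singleton, pv_ofList_append_mem _ _ h1]
      show (((PySem.Set.ofList (ps.map Prod.fst)).map
          (fun s => (s, PySem.Dict.mk (pvInner ps s)))).map _) = _
      rw [List.map_map]
      apply List.map_congr_left
      intro s _hs
      by_cases hsp : s = p.1
      · subst hsp
        simp only [Function.comp, beq_self_eq_true, if_pos]
        refine congrArg (fun d => (p.1, d)) ?_
        apply PySem.Dict.ext
        rw [PySem.Dict.items_insert_of_not_contains _ _ hc2]
        show pvInner ps p.1 ++ [(p.2, 1)] = (PySem.Dict.mk (pvInner (ps ++ [p]) p.1)).items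
        rw [pvInner_append_self, if_neg h2]
        have hcnt : ps.count p = 0 := List.count_eq_zero.mpr h2
        show pvInner ps p.1 ++ [(p.2, 1)] = pvInner ps p.1 ++ [(p.2, (ps.count p : Int) + 1)]
        rw [hcnt]
        norm_num
      · have hbeq : (s == p.1) = false := by simp [hsp]
        simp only [Function.comp, hbeq, Bool.false_eq_true, if_neg, not_false_iff]
        rw [pvInner_append_ne _ _ _ hsp]
  · have hc1 : (pvG ps).contains p.1 = false := by
      rw [Bool.eq_false_iff]
      intro hcc
      exact h1 ((pv_mkmap_contains_iff _ _ _).mp hcc)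
    have h2 : ¬ p ∈ ps := fun hp => h1 (List.mem_map_of_mem hp)
    unfold pvStepA
    rw [hc1, if_neg (by simp)]
    apply PySem.Dict.ext
    rw [PySem.Dict.items_insert_of_not_contains _ _ hc1]
    show _ = (pvG (ps ++ [p])).items
    unfold pvG
    rw [List.map_append, List.map_singleton, pv_ofList_append_not_mem _ _ h1, List.map_append]
    congr 1
    · apply List.map_congr_left
      intro s hs
      have hsmem : s ∈ ps.map Prod.fst := (PySem.Set.mem_ofList _ _).mp hs
      have hsp : s ≠ p.1 := fun e => h1 (e ▸ hsmem)
      rw [pvInner_append_ne _ _ _ hsp]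
    · rw [List.map_singleton]
      refine congrArg (fun d => [(p.1, d)]) ?_
      apply PySem.Dict.ext
      have hinner0 : pvInner ps p.1 = [] := by
        unfold pvInner
        have hf0 : (PySem.Set.ofList ps).filter (fun q => q.1 == p.1) = [] := by
          rw [List.filter_eq_nil_iff]
          intro q hq
          have hqS : q ∈ ps := (PySem.Set.mem_ofList _ _).mp hq
          simp only [beq_iff_eq]
          exact fun e => h1 (e ▸ List.mem_map_of_mem hqS)
        rw [hf0, List.map_nil]
      have hcnt : ps.count p = 0 := List.count_eq_zero.mpr h2
      rw [pvInner_append_self, if_neg h2, hinner0, hcnt]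
      show (PySem.Dict.empty.insert p.2 1).items = [] ++ [(p.2, ((0 : Nat) : Int) + 1)]
      rw [PySem.Dict.items_insert_of_not_contains _ _ (by rfl)]
      norm_num
      rfl

lemma pvLA (ps : List (String × String)) :
    ps.foldl pvStepA PySem.Dict.empty = pvG ps := by
  induction ps using List.reverseRecOn with
  | nil => rfl
  | append_singleton ps p ih =>
    rw [List.foldl_append, List.foldl_cons, List.foldl_nil, ih, pv_stepA_G]

-- zip of consecutive events as an index map
lemma pv_zip_eq_range (es : List (List (String × String))) :
    es.zip es.tail = (List.range (es.length - 1)).map (fun k => (es.getD k [], es.getD (k + 1) [])) := by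
  apply List.ext_getElem
  · simp [List.length_zip, List.length_tail]
  · intro i h1 h2
    simp only [List.length_zip, List.length_tail] at h1
    have hi : i < es.length - 1 := by omega
    simp [List.getElem_zip, List.getElem_tail, List.getElem_map, List.getElem_range,
      List.getD_eq_getElem?_getD, List.getElem?_eq_getElem (by omega : i < es.length),
      List.getElem?_eq_getElem (by omega : i + 1 < es.length)]

-- the inner index loop of A is the pair fold
lemma pv_rangefold (es : List (List (String × String))) (g : PySem.Dict String (PySem.Dict String Int)) :
    (PySem.List.pyRange 0 (PySem.List.len es - 1) 1).foldl (fun dg i =>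
        let current_event := PySem.List.pyGetD es i []
        let next_event := PySem.List.pyGetD es (i + 1) []
        let current_activity := ((PySem.Dict.mk current_event).get? "activity").getD ""
        let next_activity := ((PySem.Dict.mk next_event).get? "activity").getD ""
        if dg.contains current_activity then
          if (dg.getD current_activity PySem.Dict.empty).contains next_activity then
            dg.modify current_activity PySem.Dict.empty (fun inner => inner.modify next_activity 0 (· + 1))
          else
            dg.modify current_activity PySem.Dict.empty (fun inner => inner.insert next_activity 1)
        else
          dg.insert current_activity (PySem.Dict.empty.insert next_activity 1)) g
      = (pvPairs es).foldl pvStepA g := by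
  cases es with
  | nil =>
    have h0 : PySem.List.pyRange 0 (PySem.List.len ([] : List (List (String × String))) - 1) 1
        = [] := by decide
    rw [h0]
    rfl
  | cons e es' =>
    rw [PySem.List.len_eq]
    have hlen : (((e :: es').length : Nat) : Int) - 1 = (((e :: es').length - 1 : Nat) : Int) := by
      simp only [List.length_cons, Nat.add_sub_cancel]
      push_cast
      ring
    rw [hlen, PySem.List.pyRange_zero_natCast, List.foldl_map]
    unfold pvPairs
    rw [pv_zip_eq_range, List.foldl_map, List.foldl_map]
    apply pv_foldl_funext
    intro dg k
    have hg1 : PySem.List.pyGetD (e :: es') ((k : Int)) [] = (e :: es').getD k [] :=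
      PySem.List.pyGetD_natCast _ _ _
    have hg2 : PySem.List.pyGetD (e :: es') ((k : Int) + 1) [] = (e :: es').getD (k + 1) [] := by
      rw [show ((k : Int) + 1) = (((k + 1 : Nat)) : Int) by push_cast; ring]
      exact PySem.List.pyGetD_natCast _ _ _
    simp only [hg1, hg2, pvStepA, pvAct]

-- A as a flat fold over all pairs
lemma pvA_eq (log : List (String × List (List (String × String)))) :
    dependency_graph_inline log
      = ((pvPs log).foldl pvStepA PySem.Dict.empty).items.map (fun p => (p.1, p.2.items)) := by
  simp only [dependency_graph_inline, pvPs]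
  rw [List.foldl_flatMap]
  refine congrArg (fun d : PySem.Dict String (PySem.Dict String Int) =>
    d.items.map (fun p => (p.1, p.2.items))) ?_
  exact pv_foldl_funext _ _ _ _ (fun dg ce => pv_rangefold ce.2 dg)

-- B's flat pair list is pvPs (drop 1 = tail)
lemma pvB_pairs (log : List (String × List (List (String × String)))) :
    log.flatMap (fun ce => (ce.2.zip (ce.2.drop 1)).map (fun ab =>
      (((PySem.Dict.mk ab.1).get? "activity").getD "",
       ((PySem.Dict.mk ab.2).get? "activity").getD ""))) = pvPs log := by
  unfold pvPs pvPairs pvAct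
  apply List.flatMap_congr
  intro ce _
  rw [List.drop_one]

-- B computes exactly (pvG ps).items flattened
lemma pvB_eq (log : List (String × List (List (String × String)))) :
    dependency_graph_inline_alt log
      = ((pvG (pvPs log)).items).map (fun p => (p.1, p.2.items)) := by
  simp only [dependency_graph_inline_alt]
  rw [pvB_pairs]
  unfold pvG
  show _ = (((PySem.Set.ofList ((pvPs log).map Prod.fst)).map
      (fun s => (s, PySem.Dict.mk (pvInner (pvPs log) s)))).map (fun p => (p.1, p.2.items)))
  rw [List.map_map]
  apply List.map_congr_left
  intro src _
  simp only [Function.comp]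
  refine congrArg (fun l => (src, l)) ?_
  show _ = pvInner (pvPs log) src
  unfold pvInner
  apply List.map_congr_left
  intro q hq
  have hq1 : q.1 = src := by simpa [beq_iff_eq] using (List.mem_filter.mp hq).2
  rw [show (src, q.2) = q by rw [← hq1]]

theorem pv_main (log : List (String × List (List (String × String)))) :
    dependency_graph_inline log = dependency_graph_inline_alt log := by
  rw [pvA_eq, pvB_eq, pvLA]

-- ===== VERDICT (by name: the statement is the Claim_ definition above) =====
theorem dependency_graph_inline_spec : Claim_equal_dependency_graph_inline := by
  intro log _ _
  unfold Spec_dependency_graph_inline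
  exact pv_main log
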